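-- pv_equiv track=rewrite | github.com/AastikRajan/Astro-brain | vedic_engine/timing/rare_dashas.py | _generate_mandooka_sequence
-- ===== SOURCE A (Python) =====
-- from typing import Dict, Any, List, Optional, Tuple
--
-- _MODALITY = {
--     0: 0, 1: 1, 2: 2, 3: 0, 4: 1, 5: 2,
--     6: 0, 7: 1, 8: 2, 9: 0, 10: 1, 11: 2,
-- }
--
-- def _generate_mandooka_sequence(start: int, direct: bool) -> List[int]:
--     """Generate Mandooka sequence dynamically for any starting sign."""
--     modality = _MODALITY[start]
--
--     # Modality order: start with start's modality, then next two
--     modality_order = [(modality + i) % 3 for i in range(3)]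
--
--     # Get signs of each modality
--     modality_signs = {m: [s for s in range(12) if _MODALITY[s] == m] for m in range(3)}
--
--     sequence = []
--     for mod in modality_order:
--         signs = modality_signs[mod]
--         # Sort by every-4th-sign jump from appropriate starting point
--         if direct:
--             # Find the sign closest to start among this modality's signs
--             idx = min(range(len(signs)), key=lambda i: (signs[i] - start) % 12)
--             ordered = [signs[(idx + j) % len(signs)] for j in range(len(signs))]
--         else:
--             idx = min(range(len(signs)), key=lambda i: (start - signs[i]) % 12)
--             ordered = [signs[(idx - j) % len(signs)] for j in range(len(signs))]
--         sequence.extend(ordered)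
--
--     return sequence
-- ===== SOURCE B (Python) =====
-- def _generate_mandooka_sequence(start: int, direct: bool):
--     """Generate Mandooka sequence via one global key-based sort."""
--     step = 1 if direct else -1
--     return sorted(range(12), key=lambda s: ((s - start) % 3, (step * (s - start)) % 12))
-- ===== Notes on version B (the rewrite author's own statement) =====
-- stated objective: simpler
-- what changed: Replaced the modality-dict construction, the per-modality min-over-index nearest-sign search and the manual rotation with a single global sort of range(12) keyed by (modality distance, signed cyclic distance from start).
import Mathlib
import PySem

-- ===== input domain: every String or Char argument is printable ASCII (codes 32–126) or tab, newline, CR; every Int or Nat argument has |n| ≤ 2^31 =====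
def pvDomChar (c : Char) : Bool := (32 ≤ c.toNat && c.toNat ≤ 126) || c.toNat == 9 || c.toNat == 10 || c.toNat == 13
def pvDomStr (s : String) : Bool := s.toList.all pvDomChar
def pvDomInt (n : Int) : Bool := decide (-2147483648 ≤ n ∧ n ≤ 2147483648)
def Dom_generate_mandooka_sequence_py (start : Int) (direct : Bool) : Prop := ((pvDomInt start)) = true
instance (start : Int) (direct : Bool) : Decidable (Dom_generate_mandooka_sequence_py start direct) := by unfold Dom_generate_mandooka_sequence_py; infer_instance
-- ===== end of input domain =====

-- B replaces A's per-modality nearest-sign search and rotation by ONE global key-based sort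
-- of range(12); objective: simpler. Equivalence is proved for start in 0..11 (elsewhere A raises KeyError).

-- ===== PORT A =====
-- the module-level _MODALITY dict
def pvModalityDict : PySem.Dict Int Int := PySem.Dict.ofList
  [(0,0),(1,1),(2,2),(3,0),(4,1),(5,2),(6,0),(7,1),(8,2),(9,0),(10,1),(11,2)]

def generate_mandooka_sequence_py (start : Int) (direct : Bool) : List Int :=
  -- _MODALITY[start]: KeyError (none) outside Pre_; .getD 0 is never the value used under Pre_
  let modality := (PySem.Dict.get? pvModalityDict start).getD 0
  let modality_order := (PySem.List.pyRange 0 3 1).map (fun i => PySem.Int.mod (modality + i) 3)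
  let modality_signs : PySem.Dict Int (List Int) :=
    PySem.Dict.ofList <| (PySem.List.pyRange 0 3 1).map
      (fun m => (m, (PySem.List.pyRange 0 12 1).filter
        (fun s => (PySem.Dict.get? pvModalityDict s).getD 0 == m)))
  modality_order.foldl (fun sequence md =>
    let signs := (PySem.Dict.get? modality_signs md).getD []
    let ordered :=
      if direct then
        -- min over range(len(signs)) keyed by (signs[i] - start) % 12 (signs nonempty, so min? = some)
        let idx := (PySem.List.min? (PySem.List.pyRange 0 (signs.length : Int) 1)
                      (fun i => PySem.Int.mod (PySem.List.pyGetD signs i 0 - start) 12)).getD 0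
        (PySem.List.pyRange 0 (signs.length : Int) 1).map
          (fun j => PySem.List.pyGetD signs (PySem.Int.mod (idx + j) (signs.length : Int)) 0)
      else
        let idx := (PySem.List.min? (PySem.List.pyRange 0 (signs.length : Int) 1)
                      (fun i => PySem.Int.mod (start - PySem.List.pyGetD signs i 0) 12)).getD 0
        (PySem.List.pyRange 0 (signs.length : Int) 1).map
          (fun j => PySem.List.pyGetD signs (PySem.Int.mod (idx - j) (signs.length : Int)) 0)
    sequence ++ ordered) []

-- ===== PORT B =====
def generate_mandooka_sequence_py_alt (start : Int) (direct : Bool) : List Int :=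
  let step : Int := if direct then 1 else -1
  PySem.List.sorted2 (PySem.List.pyRange 0 12 1)
    (fun s => PySem.Int.mod (s - start) 3)
    (fun s => PySem.Int.mod (step * (s - start)) 12)

-- ===== PRECONDITION & SPEC =====
-- A raises KeyError (_MODALITY[start]) for start outside 0..11; Pre_ admits exactly the keys of _MODALITY.
def Pre_generate_mandooka_sequence_py (start : Int) (direct : Bool) : Prop :=
  0 ≤ start ∧ start < 12
instance (start : Int) (direct : Bool) : Decidable (Pre_generate_mandooka_sequence_py start direct) := by
  unfold Pre_generate_mandooka_sequence_py; infer_instance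
def pvWitness_generate_mandooka_sequence_py : Int × Bool := (3, true)

def Spec_generate_mandooka_sequence_py (start : Int) (direct : Bool) (out : List Int) : Prop := out = generate_mandooka_sequence_py_alt start direct
instance (start : Int) (direct : Bool) (out : List Int) : Decidable (Spec_generate_mandooka_sequence_py start direct out) := by unfold Spec_generate_mandooka_sequence_py; infer_instance

-- ===== CLAIM (what is proved, stated in full; the proofs are below) =====
def Claim_equal_generate_mandooka_sequence_py : Prop := ∀ (start : Int) (direct : Bool), Dom_generate_mandooka_sequence_py start direct → Pre_generate_mandooka_sequence_py start direct → Spec_generate_mandooka_sequence_py start direct (generate_mandooka_sequence_py start direct)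

-- ===== LEMMAS AND PROOFS =====

-- ===== VERDICT (by name: the statement is the Claim_ definition above) =====
theorem generate_mandooka_sequence_py_spec : Claim_equal_generate_mandooka_sequence_py := by
  intro start direct _ hpre
  obtain ⟨h0, h1⟩ := hpre
  interval_cases start <;> cases direct <;> decide
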